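-- pv_equiv track=rewrite | github.com/linneszyx/CP-Problems | Medium/Sum of Products/sum-of-products.py | pairAndSum
-- ===== SOURCE A (Python) =====
-- def pairAndSum(n, arr):
--     #code here
--     r = 0
--     for i in range(32):
--         c = 0
--         for j in arr:
--             if (1<<i) & j!=0:
--                 c=c+1
--         r+=2**i*c*(c-1)//2
--     return r
-- ===== SOURCE B (Python) =====
-- def pairAndSum(n, arr):
--     # Different decomposition: instead of counting set bits per position,
--     # sum arr[i] & arr[j] directly over all unordered pairs, keeping only
--     # the low 32 bits of each AND (exactly the 32 bit positions A sums over).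
--     mask = (1 << 32) - 1
--     r = 0
--     for i in range(len(arr)):
--         for j in range(i + 1, len(arr)):
--             r += arr[i] & arr[j] & mask
--     return r
-- ===== Notes on version B (the rewrite author's own statement) =====
-- stated objective: alternative
-- what changed: B sums arr[i] & arr[j] & mask directly over all unordered pairs (mask = low 32 bits, the same 32 bit positions A iterates over), replacing A's per-bit-position counting with a per-pair accumulation.
import Mathlib
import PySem

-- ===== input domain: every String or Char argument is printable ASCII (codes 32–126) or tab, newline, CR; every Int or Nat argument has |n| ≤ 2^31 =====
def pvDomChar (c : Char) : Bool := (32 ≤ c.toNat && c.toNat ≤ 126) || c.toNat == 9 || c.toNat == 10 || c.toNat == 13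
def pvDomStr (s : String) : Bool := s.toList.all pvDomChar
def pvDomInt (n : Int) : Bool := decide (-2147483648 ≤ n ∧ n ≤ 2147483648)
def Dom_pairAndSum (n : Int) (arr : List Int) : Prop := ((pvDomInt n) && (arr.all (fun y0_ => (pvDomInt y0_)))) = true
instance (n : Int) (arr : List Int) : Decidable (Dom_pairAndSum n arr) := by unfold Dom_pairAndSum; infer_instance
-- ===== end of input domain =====

-- B sums arr[i] & arr[j] & (2^32-1) over all unordered pairs instead of A's per-bit-position
-- counting (objective: alternative decomposition; B is O(n^2), not faster than A's O(32 n)).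

-- ===== PORT A =====
-- Literal port of A: for i in range(32): count elements with (1<<i) & j != 0, add 2**i*c*(c-1)//2.
-- range(32) is ported as List.range 32 (exact: the literal bound is nonnegative); each Python
-- `for` becomes a foldl over the same accumulator.
def pairAndSum (n : Int) (arr : List Int) : Int :=
  (List.range 32).foldl (fun (r : Int) (i : Nat) =>
    let c : Int := arr.foldl (fun c j => if PySem.Int.band ((1 : Int) <<< i) j ≠ 0 then c + 1 else c) 0
    r + PySem.Int.floordiv ((2 : Int) ^ i * c * (c - 1)) 2) 0

-- ===== PORT B =====
-- Literal port of B: the outer index loop (arr[i] paired with all later arr[j]) becomes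
-- structural recursion on the tail; the inner loop is a foldl threading the running sum r.
def pvPairsB (mask : Int) : List Int → Int → Int
  | [], r => r
  | x :: rest, r => pvPairsB mask rest (rest.foldl (fun acc y => acc + PySem.Int.band (PySem.Int.band x y) mask) r)

def pairAndSum_alt (n : Int) (arr : List Int) : Int :=
  pvPairsB (((1 : Int) <<< 32) - 1) arr 0

-- ===== PRECONDITION & SPEC =====
def Spec_pairAndSum (n : Int) (arr : List Int) (out : Int) : Prop := out = pairAndSum_alt n arr
instance (n : Int) (arr : List Int) (out : Int) : Decidable (Spec_pairAndSum n arr out) := by unfold Spec_pairAndSum; infer_instance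

-- ===== CLAIM (what is proved, stated in full; the proofs are below) =====
def Claim_equal_pairAndSum : Prop := ∀ (n : Int) (arr : List Int), Dom_pairAndSum n arr → Spec_pairAndSum n arr (pairAndSum n arr)

-- ===== LEMMAS AND PROOFS =====

-- bit i of z, as Python computes it for ANY int (two's complement): (z >> i) % 2
def pvBit (i : Nat) (z : Int) : Int := z / 2 ^ i % 2

theorem pvBit_cases (i : Nat) (z : Int) : pvBit i z = 0 ∨ pvBit i z = 1 := Int.emod_two_eq _

theorem pvBit_succ (i : Nat) (z : Int) : pvBit (i + 1) z = pvBit i (z / 2) := by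
  unfold pvBit
  rw [Int.ediv_ediv_of_nonneg (by norm_num : (0:Int) ≤ 2), ← pow_succ']

-- %2 of a Nat-level AND / OR
theorem natAnd2 (m n : Nat) : (m &&& n) % 2 = (m % 2) * (n % 2) := by
  have h : ((m &&& n) % 2 = 1) ↔ (m % 2 = 1 ∧ n % 2 = 1) := Nat.and_mod_two_eq_one
  have hk := Nat.mod_two_eq_zero_or_one (m &&& n)
  by_cases hb : (m &&& n) % 2 = 1
  · obtain ⟨hm, hn⟩ := h.1 hb
    rw [hb, hm, hn]
  · have h0 : (m &&& n) % 2 = 0 := by omega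
    have hc : ¬(m % 2 = 1 ∧ n % 2 = 1) := fun hc => hb (h.2 hc)
    rcases Nat.mod_two_eq_zero_or_one m with hm|hm <;> rcases Nat.mod_two_eq_zero_or_one n with hn|hn <;>
      simp [hm, hn, h0] at hc ⊢

theorem natOr2 (m n : Nat) : (m ||| n) % 2 = (m % 2) + (n % 2) - (m % 2) * (n % 2) := by
  have h : ((m ||| n) % 2 = 1) ↔ (m % 2 = 1 ∨ n % 2 = 1) := Nat.or_mod_two_eq_one
  have hk := Nat.mod_two_eq_zero_or_one (m ||| n)
  by_cases hb : (m ||| n) % 2 = 1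
  · rcases Nat.mod_two_eq_zero_or_one m with hm|hm <;> rcases Nat.mod_two_eq_zero_or_one n with hn|hn <;>
      simp [hm, hn, hb] at h ⊢
  · have h0 : (m ||| n) % 2 = 0 := by omega
    have hc : ¬(m % 2 = 1 ∨ n % 2 = 1) := fun hc => hb (h.2 hc)
    rcases Nat.mod_two_eq_zero_or_one m with hm|hm <;> rcases Nat.mod_two_eq_zero_or_one n with hn|hn <;>
      simp [hm, hn, h0] at hc ⊢

theorem natAndRec (m n : Nat) : m &&& n = 2 * ((m/2) &&& (n/2)) + (m%2) * (n%2) := by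
  have h1 : (m &&& n) / 2 = m/2 &&& n/2 := Nat.and_div_two
  have h2 := natAnd2 m n
  omega

theorem natOrRec (m n : Nat) : m ||| n = 2 * ((m/2) ||| (n/2)) + ((m%2) + (n%2) - (m%2) * (n%2)) := by
  have h1 : (m ||| n) / 2 = m/2 ||| n/2 := Nat.or_div_two
  have h2 := natOr2 m n
  have h3 : (m%2) * (n%2) ≤ m % 2 := by rcases Nat.mod_two_eq_zero_or_one n with h|h <;> simp [h]
  omega

-- evaluation of band on the sign cases
theorem band_np (m n : Nat) : PySem.Int.band (m : Int) (Int.negSucc n) = ((m - (m &&& n) : Nat) : Int) := by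
  rw [PySem.Int.band.eq_1, if_pos (by positivity), if_neg (by omega)]
  norm_num

theorem band_pn (m n : Nat) : PySem.Int.band (Int.negSucc m) (n : Int) = ((n - (n &&& m) : Nat) : Int) := by
  rw [PySem.Int.band.eq_1, if_neg (by omega), if_pos (by positivity)]
  have h : (-Int.negSucc m - 1).toNat = m := by omega
  rw [h, Int.toNat_natCast]

theorem band_negSucc_negSucc (m n : Nat) : PySem.Int.band (Int.negSucc m) (Int.negSucc n) = -((m ||| n : Nat) : Int) - 1 := by
  rw [PySem.Int.band.eq_1, if_neg (by omega), if_neg (by omega)]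
  have h1 : (-Int.negSucc m - 1).toNat = m := by omega
  have h2 : (-Int.negSucc n - 1).toNat = n := by omega
  rw [h1, h2]

-- Python's & halves: a & b = 2*((a>>1) & (b>>1)) + (a%2)*(b%2), on ALL integers
theorem band_rec (a b : Int) :
    PySem.Int.band a b = 2 * PySem.Int.band (a / 2) (b / 2) + (a % 2) * (b % 2) := by
  rcases a with m | m <;> rcases b with n | n
  · simp only [Int.ofNat_eq_natCast]
    have e1 : ((m : Int)) / 2 = ((m/2 : Nat) : Int) := by omega
    have e2 : ((n : Int)) / 2 = ((n/2 : Nat) : Int) := by omega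
    have e3 : ((m : Int)) % 2 = ((m % 2 : Nat) : Int) := by omega
    have e4 : ((n : Int)) % 2 = ((n % 2 : Nat) : Int) := by omega
    rw [e1, e2, e3, e4, PySem.Int.band_natCast, PySem.Int.band_natCast]
    exact_mod_cast natAndRec m n
  · simp only [Int.ofNat_eq_natCast]
    have e1 : ((m : Int)) / 2 = ((m/2 : Nat) : Int) := by omega
    have e2 : (Int.negSucc n) / 2 = Int.negSucc (n/2) := by omega
    have e3 : ((m : Int)) % 2 = ((m % 2 : Nat) : Int) := by omega
    have e4 : (Int.negSucc n) % 2 = 1 - ((n % 2 : Nat) : Int) := by omega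
    rw [e1, e2, e3, e4, band_np, band_np]
    have hand := natAndRec m n
    have hd : (m &&& n) / 2 = m/2 &&& n/2 := Nat.and_div_two
    have hle : m &&& n ≤ m := Nat.and_le_left
    have hle2 : m/2 &&& n/2 ≤ m/2 := Nat.and_le_left
    rcases Nat.mod_two_eq_zero_or_one m with hm|hm <;> rcases Nat.mod_two_eq_zero_or_one n with hn|hn <;>
      simp only [hm, hn] at hand ⊢ <;> push_cast <;> omega
  · simp only [Int.ofNat_eq_natCast]
    have e1 : (Int.negSucc m) / 2 = Int.negSucc (m/2) := by omega
    have e2 : ((n : Int)) / 2 = ((n/2 : Nat) : Int) := by omega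
    have e3 : (Int.negSucc m) % 2 = 1 - ((m % 2 : Nat) : Int) := by omega
    have e4 : ((n : Int)) % 2 = ((n % 2 : Nat) : Int) := by omega
    rw [e1, e2, e3, e4, band_pn, band_pn]
    have hand := natAndRec n m
    have hd : (n &&& m) / 2 = n/2 &&& m/2 := Nat.and_div_two
    have hle : n &&& m ≤ n := Nat.and_le_left
    have hle2 : n/2 &&& m/2 ≤ n/2 := Nat.and_le_left
    rcases Nat.mod_two_eq_zero_or_one m with hm|hm <;> rcases Nat.mod_two_eq_zero_or_one n with hn|hn <;>
      simp only [hm, hn] at hand ⊢ <;> push_cast <;> omega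
  · have e1 : (Int.negSucc m) / 2 = Int.negSucc (m/2) := by omega
    have e2 : (Int.negSucc n) / 2 = Int.negSucc (n/2) := by omega
    have e3 : (Int.negSucc m) % 2 = 1 - ((m % 2 : Nat) : Int) := by omega
    have e4 : (Int.negSucc n) % 2 = 1 - ((n % 2 : Nat) : Int) := by omega
    rw [e1, e2, e3, e4, band_negSucc_negSucc, band_negSucc_negSucc]
    have hor := natOrRec m n
    have hp : (m%2) * (n%2) ≤ m % 2 := by rcases Nat.mod_two_eq_zero_or_one n with h|h <;> simp [h]
    rcases Nat.mod_two_eq_zero_or_one m with hm|hm <;> rcases Nat.mod_two_eq_zero_or_one n with hn|hn <;>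
      simp only [hm, hn] at hor ⊢ <;> push_cast <;> omega

-- (1 << i) & j is 2^i times bit i of j
theorem band_two_pow (i : Nat) (j : Int) : PySem.Int.band (2 ^ i) j = 2 ^ i * pvBit i j := by
  induction i generalizing j with
  | zero =>
    rw [pow_zero, PySem.Int.band_comm, PySem.Int.band_one]
    simp [pysem, pvBit]
  | succ i ih =>
    have h2 : (2:Int) ^ (i+1) = 2 * 2 ^ i := by ring
    rw [band_rec]
    have hd : (2:Int) ^ (i+1) / 2 = 2 ^ i := by rw [h2]; exact Int.mul_ediv_cancel_left _ (by norm_num)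
    have hm : (2:Int) ^ (i+1) % 2 = 0 := by rw [h2]; exact Int.mul_emod_right 2 _
    rw [hd, hm, ih, pvBit_succ]
    ring

-- A's loop condition, characterised
theorem cond_iff (i : Nat) (j : Int) : (PySem.Int.band ((1 : Int) <<< i) j ≠ 0) ↔ pvBit i j = 1 := by
  rw [Int.shiftLeft_eq, one_mul, band_two_pow]
  have hp : (0:Int) < 2 ^ i := by positivity
  rcases pvBit_cases i j with h | h
  · simp [h]
  · simp [h, hp.ne']

-- w % (2m) splits into the low bit and the rest
theorem emod_double (m w : Int) (hm : 0 < m) : w % (2 * m) = 2 * ((w / 2) % m) + w % 2 := by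
  have h1 : 2 * (w / 2) + w % 2 = w := Int.mul_ediv_add_emod w 2
  have h2 : m * ((w/2) / m) + (w/2) % m = w / 2 := Int.mul_ediv_add_emod (w/2) m
  have hb1 : 0 ≤ (w/2) % m := Int.emod_nonneg _ (by omega)
  have hb2 : (w/2) % m < m := Int.emod_lt_of_pos _ hm
  have hb3 : 0 ≤ w % 2 := Int.emod_nonneg _ (by norm_num)
  have hb4 : w % 2 < 2 := Int.emod_lt_of_pos _ (by norm_num)
  have hx : w = (2 * ((w/2) % m) + w % 2) + (2 * m) * ((w/2) / m) := by linarith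
  calc w % (2 * m) = ((2 * ((w/2) % m) + w % 2) + (2 * m) * ((w/2) / m)) % (2 * m) := by rw [← hx]
    _ = (2 * ((w/2) % m) + w % 2) % (2 * m) := Int.add_mul_emod_self_left _ _ _
    _ = 2 * ((w/2) % m) + w % 2 := Int.emod_eq_of_lt (by omega) (by omega)

-- the low k bits of x & y, as a sum over bit positions
theorem band_emod_sum (k : Nat) (x y : Int) :
    (PySem.Int.band x y) % 2 ^ k = ∑ i ∈ Finset.range k, 2 ^ i * (pvBit i x * pvBit i y) := by
  induction k generalizing x y with
  | zero => simp
  | succ k ih =>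
    have hxy := band_rec x y
    have hx2 := Int.emod_two_eq x
    have hy2 := Int.emod_two_eq y
    have hlow : (PySem.Int.band x y) % 2 = (x % 2) * (y % 2) := by
      rcases hx2 with h|h <;> rcases hy2 with h'|h' <;> simp [h, h'] at hxy ⊢ <;> omega
    have hhigh : (PySem.Int.band x y) / 2 = PySem.Int.band (x/2) (y/2) := by
      rcases hx2 with h|h <;> rcases hy2 with h'|h' <;> simp [h, h'] at hxy ⊢ <;> omega
    have h2 : (2:Int) ^ (k+1) = 2 * 2 ^ k := by ring
    rw [h2, emod_double _ _ (by positivity), hlow, hhigh, ih]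
    rw [Finset.sum_range_succ' (fun i => (2:Int) ^ i * (pvBit i x * pvBit i y)) k]
    have hcong : ∀ i ∈ Finset.range k,
        (2:Int) ^ (i+1) * (pvBit (i+1) x * pvBit (i+1) y)
          = 2 * (2 ^ i * (pvBit i (x/2) * pvBit i (y/2))) := by
      intro i _; rw [pvBit_succ, pvBit_succ]; ring
    rw [Finset.sum_congr rfl hcong, ← Finset.mul_sum]
    have h0 : (2:Int) ^ 0 * (pvBit 0 x * pvBit 0 y) = (x % 2) * (y % 2) := by simp [pvBit]
    rw [h0]

-- masking with 2^k - 1 is % 2^k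
theorem band_mask (k : Nat) (w : Int) : PySem.Int.band w (2 ^ k - 1) = w % 2 ^ k := by
  induction k generalizing w with
  | zero => simp [PySem.Int.band_zero]
  | succ k ih =>
    have h2 : (2:Int) ^ (k+1) = 2 * 2 ^ k := by ring
    have hp : (0:Int) < 2 ^ k := by positivity
    have hd : ((2:Int) ^ (k+1) - 1) / 2 = 2 ^ k - 1 := by omega
    have hm : ((2:Int) ^ (k+1) - 1) % 2 = 1 := by omega
    rw [band_rec, hd, hm, ih, h2, emod_double _ _ hp]
    ring

-- ---- counting / pair-sum layer ----

def pvPairSum (i : Nat) : List Int → Int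
  | [] => 0
  | x :: xs => pvBit i x * ((xs.map (pvBit i)).sum) + pvPairSum i xs

theorem sum_map_bit (i : Nat) (l : List Int) :
    (l.map (pvBit i)).sum = (l.countP (fun j => decide (pvBit i j = 1)) : Int) := by
  induction l with
  | nil => simp
  | cons x xs ih =>
    rcases pvBit_cases i x with h | h
    · simp [h, ih]
    · simp [h, ih]; omega

theorem two_mul_pvPairSum (i : Nat) (l : List Int) :
    2 * pvPairSum i l = (l.countP (fun j => decide (pvBit i j = 1)) : Int) *
      ((l.countP (fun j => decide (pvBit i j = 1)) : Int) - 1) := by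
  induction l with
  | nil => simp [pvPairSum]
  | cons x xs ih =>
    rw [pvPairSum, sum_map_bit, List.countP_cons]
    rcases pvBit_cases i x with h | h <;> simp [h] <;> linear_combination ih

-- A's inner counting loop
theorem A_inner (i : Nat) (l : List Int) (c0 : Int) :
    l.foldl (fun c j => if PySem.Int.band ((1 : Int) <<< i) j ≠ 0 then c + 1 else c) c0
      = c0 + (l.countP (fun j => decide (pvBit i j = 1)) : Int) := by
  induction l generalizing c0 with
  | nil => simp
  | cons x xs ih =>
    by_cases h : pvBit i x = 1
    · rw [List.foldl_cons, if_pos ((cond_iff i x).2 h), ih]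
      simp [h]; ring
    · rw [List.foldl_cons, if_neg (fun hc => h ((cond_iff i x).1 hc)), ih]
      simp [h]

-- A's outer loop as a range sum
theorem foldl_range_add (f : Nat → Int) (n : Nat) (r0 : Int) :
    (List.range n).foldl (fun r i => r + f i) r0 = r0 + ∑ i ∈ Finset.range n, f i := by
  induction n generalizing r0 with
  | zero => simp
  | succ n ih => rw [List.range_succ, List.foldl_append, ih, Finset.sum_range_succ, List.foldl_cons, List.foldl_nil]; ring

-- B's accumulator threading
theorem pvPairsB_eq (mask : Int) (l : List Int) (r : Int) :
    pvPairsB mask l r = r + (pvPairsB mask l 0) := by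
  induction l generalizing r with
  | nil => simp [pvPairsB]
  | cons x xs ih =>
    simp only [pvPairsB, PySem.List.foldl_add]
    rw [ih, ih (0 + (xs.map (fun y => PySem.Int.band (PySem.Int.band x y) mask)).sum)]
    ring

-- swap a list sum of Finset sums
theorem list_sum_finset_sum {F : Finset Nat} (l : List Int) (g : Nat → Int → Int) :
    (l.map (fun y => ∑ i ∈ F, g i y)).sum = ∑ i ∈ F, (l.map (fun y => g i y)).sum := by
  induction l with
  | nil => simp
  | cons x xs ih => simp [ih, Finset.sum_add_distrib]

-- B's total equals the bitwise pair sums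
theorem B_eq_sum (l : List Int) :
    pvPairsB ((2:Int) ^ 32 - 1) l 0 = ∑ i ∈ Finset.range 32, 2 ^ i * pvPairSum i l := by
  induction l with
  | nil => simp [pvPairsB, pvPairSum]
  | cons x xs ih =>
    rw [pvPairsB, PySem.List.foldl_add, pvPairsB_eq, ih]
    have hmap : ∀ y : Int, PySem.Int.band (PySem.Int.band x y) ((2:Int) ^ 32 - 1)
        = ∑ i ∈ Finset.range 32, 2 ^ i * (pvBit i x * pvBit i y) := fun y => by
      rw [band_mask, band_emod_sum]
    simp only [hmap]
    rw [list_sum_finset_sum]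
    have hinner : ∀ i, ((xs.map (fun y => (2:Int) ^ i * (pvBit i x * pvBit i y))).sum)
        = 2 ^ i * (pvBit i x * (xs.map (pvBit i)).sum) := by
      intro i
      rw [show (fun y => (2:Int) ^ i * (pvBit i x * pvBit i y)) = (fun y => (2 ^ i * pvBit i x) * pvBit i y) by funext y; ring]
      rw [List.sum_map_mul_left]; ring
    simp only [hinner]
    rw [show (∑ i ∈ Finset.range 32, (2:Int) ^ i * pvPairSum i (x :: xs))
        = ∑ i ∈ Finset.range 32, (2 ^ i * (pvBit i x * (xs.map (pvBit i)).sum) + 2 ^ i * pvPairSum i xs) from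
      Finset.sum_congr rfl fun i _ => by rw [pvPairSum]; ring]
    rw [Finset.sum_add_distrib]
    ring

-- A's per-bit term equals 2^i times the pair sum
theorem A_term (i : Nat) (l : List Int) :
    PySem.Int.floordiv (2 ^ i * (l.countP (fun j => decide (pvBit i j = 1)) : Int) *
        ((l.countP (fun j => decide (pvBit i j = 1)) : Int) - 1)) 2
      = 2 ^ i * pvPairSum i l := by
  have h := two_mul_pvPairSum i l
  have he : (2:Int) ^ i * (l.countP (fun j => decide (pvBit i j = 1)) : Int) *
      ((l.countP (fun j => decide (pvBit i j = 1)) : Int) - 1) = 2 * (2 ^ i * pvPairSum i l) := by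
    linear_combination (-(2:Int) ^ i) * h
  rw [he]
  have hf : PySem.Int.floordiv (2 * (2 ^ i * pvPairSum i l)) 2 = (2 * (2 ^ i * pvPairSum i l)) / 2 := by
    simp [pysem]
  rw [hf, Int.mul_ediv_cancel_left _ (by norm_num)]

-- A evaluated: its foldl over range 32 is the per-bit sum
theorem A_eval (n : Int) (arr : List Int) :
    pairAndSum n arr = ∑ i ∈ Finset.range 32, 2 ^ i * pvPairSum i arr := by
  have h0 : pairAndSum n arr = (List.range 32).foldl (fun (r : Int) (i : Nat) =>
      r + PySem.Int.floordiv ((2 : Int) ^ i *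
        (arr.foldl (fun c j => if PySem.Int.band ((1 : Int) <<< i) j ≠ 0 then c + 1 else c) 0) *
        ((arr.foldl (fun c j => if PySem.Int.band ((1 : Int) <<< i) j ≠ 0 then c + 1 else c) 0) - 1)) 2) 0 := rfl
  rw [h0]
  rw [show (fun (r : Int) (i : Nat) =>
      r + PySem.Int.floordiv ((2 : Int) ^ i *
        (arr.foldl (fun c j => if PySem.Int.band ((1 : Int) <<< i) j ≠ 0 then c + 1 else c) 0) *
        ((arr.foldl (fun c j => if PySem.Int.band ((1 : Int) <<< i) j ≠ 0 then c + 1 else c) 0) - 1)) 2)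
      = (fun (r : Int) (i : Nat) => r + 2 ^ i * pvPairSum i arr) from
    funext fun r => funext fun i => by rw [A_inner, zero_add, A_term]]
  rw [foldl_range_add, zero_add]

-- B evaluated: the pair loop is the same per-bit sum
theorem B_eval (n : Int) (arr : List Int) :
    pairAndSum_alt n arr = ∑ i ∈ Finset.range 32, 2 ^ i * pvPairSum i arr := by
  unfold pairAndSum_alt
  have hmask : ((1 : Int) <<< 32) - 1 = (2:Int) ^ 32 - 1 := by decide
  rw [hmask]
  exact B_eq_sum arr

-- ===== VERDICT (by name: the statement is the Claim_ definition above) =====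
theorem pairAndSum_spec : Claim_equal_pairAndSum := by
  intro n arr _
  unfold Spec_pairAndSum
  rw [A_eval, B_eval]
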